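-- pv_equiv track=rewrite | github.com/ArkadiuszLyjak/python_udemy_course | nazwy_plikow/rename_files/rename_normalize.py | stem_title_case
-- ===== SOURCE A (Python) =====
-- def stem_title_case(stem: str) -> str:
--     """Z 'ala_ma_kota' robi 'Ala_Ma_Kota' (TitleCase po separatorze '_')."""
--     parts = stem.split("_")
--     out = []
--     for part in parts:
--         if not part:
--             out.append(part)
--         elif part.isdigit():
--             out.append(part)
--         else:
--             out.append(part[0].upper() + part[1:].lower() if len(part) > 1 else part.upper())
--     return "_".join(out)
-- ===== SOURCE B (Python) =====
-- def stem_title_case(stem: str) -> str: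
--     out = []
--     at_start = True
--     for ch in stem:
--         if ch == "_":
--             out.append(ch)
--             at_start = True
--         else:
--             out.append(ch.upper() if at_start else ch.lower())
--             at_start = False
--     return "".join(out)
-- ===== Notes on version B (the rewrite author's own statement) =====
-- stated objective: alternative
-- what changed: Replaces split-on-underscore / per-part transform / join with a single character-by-character scan that carries an at-start-of-segment flag and cases each character directly.
import Mathlib
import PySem

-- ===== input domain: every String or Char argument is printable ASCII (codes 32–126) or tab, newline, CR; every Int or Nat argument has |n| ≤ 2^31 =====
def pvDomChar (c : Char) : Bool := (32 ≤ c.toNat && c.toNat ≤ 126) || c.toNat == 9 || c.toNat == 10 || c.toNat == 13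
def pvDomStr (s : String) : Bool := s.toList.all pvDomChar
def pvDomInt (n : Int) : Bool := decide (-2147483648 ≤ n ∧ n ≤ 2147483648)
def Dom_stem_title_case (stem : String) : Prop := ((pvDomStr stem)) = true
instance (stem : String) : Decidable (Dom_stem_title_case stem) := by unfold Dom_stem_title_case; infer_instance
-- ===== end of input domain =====

-- B replaces A's split-on-'_' / per-part transform / join with a single left-to-right
-- character scan carrying an at-start-of-segment flag (objective: alternative decomposition).

-- ===== PORT A =====
-- the body of A's per-part loop: '' and digit-only parts kept, else TitleCase the part
def pvAPart (part : List Char) : List Char :=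
  if part = [] then part
  else if PySem.Chars.strIsdigit part then part
  else if 1 < PySem.Chars.len part then
    PySem.Chars.upper (PySem.Chars.slice part none (some 1)) ++
      PySem.Chars.lower (PySem.Chars.slice part (some 1) none)
  else PySem.Chars.upper part

def stem_title_case (stem : String) : String :=
  String.mk (PySem.Chars.join ['_'] ((PySem.Chars.splitOn stem.toList ['_']).map pvAPart))

-- ===== PORT B =====
-- Source B's loop state: (collected output, at_start flag)
def pvBStep (st : List Char × Bool) (c : Char) : List Char × Bool :=
  if c = '_' then (st.1 ++ ['_'], true)
  else (st.1 ++ [if st.2 then PySem.Chars.upperChar c else PySem.Chars.lowerChar c], false)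

def stem_title_case_alt (stem : String) : String :=
  String.mk (stem.toList.foldl pvBStep ([], true)).1

-- ===== PRECONDITION & SPEC =====
def Spec_stem_title_case (stem : String) (out : String) : Prop := out = stem_title_case_alt stem
instance (stem : String) (out : String) : Decidable (Spec_stem_title_case stem out) := by unfold Spec_stem_title_case; infer_instance

-- ===== CLAIM (what is proved, stated in full; the proofs are below) =====
def Claim_equal_stem_title_case : Prop := ∀ (stem : String), Dom_stem_title_case stem → Spec_stem_title_case stem (stem_title_case stem)

-- ===== LEMMAS AND PROOFS =====

-- a simple recursive reference: the per-character cased scan with the at-start flag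
def pvScan : Bool → List Char → List Char
  | _, [] => []
  | b, c :: r =>
    if c = '_' then '_' :: pvScan true r
    else (if b then PySem.Chars.upperChar c else PySem.Chars.lowerChar c) :: pvScan false r

-- a simple recursive form of split on '_'
def pvSplitU : List Char → List (List Char)
  | [] => [[]]
  | c :: r =>
    if c = '_' then [] :: pvSplitU r
    else
      match pvSplitU r with
      | [] => [[c]]     -- unreachable: pvSplitU is never []
      | p :: ps => (c :: p) :: ps

lemma pvSplitU_ne_nil (l : List Char) : pvSplitU l ≠ [] := by
  cases l with
  | nil => simp [pvSplitU]
  | cons c r =>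
    simp only [pvSplitU]
    split_ifs
    · simp
    · cases pvSplitU r <;> simp

lemma pvSplitU_cons (l : List Char) : ∃ p ps, pvSplitU l = p :: ps := by
  cases h : pvSplitU l with
  | nil => exact absurd h (pvSplitU_ne_nil l)
  | cons p ps => exact ⟨p, ps, rfl⟩

lemma pvGo_eq (l : List Char) : ∀ fuel, l.length ≤ fuel → ∀ cur acc p ps,
    pvSplitU l = p :: ps →
    PySem.Chars.splitOn.go ['_'] fuel l cur acc = acc.reverse ++ (cur.reverse ++ p) :: ps := by
  induction l with
  | nil =>
    intro fuel _ cur acc p ps hs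
    simp only [pvSplitU] at hs
    injection hs with h1 h2; subst h1; subst h2
    cases fuel <;> simp [PySem.Chars.splitOn.go]
  | cons c r ih =>
    intro fuel hf cur acc p ps hs
    cases fuel with
    | zero => simp at hf
    | succ f =>
      simp only [List.length_cons, Nat.succ_le_succ_iff] at hf
      obtain ⟨q, qs, hq⟩ := pvSplitU_cons r
      by_cases hc : c = '_'
      · subst hc
        simp only [pvSplitU, if_pos, hq] at hs
        injection hs with h1 h2; subst h1; subst h2
        have hpre : List.isPrefixOf ['_'] ('_' :: r) = true := by simp [List.isPrefixOf]
        have hdrop : List.drop (['_'] : List Char).length ('_' :: r) = r := rfl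
        simp only [PySem.Chars.splitOn.go, hpre, if_pos, hdrop]
        rw [ih f hf [] (cur.reverse :: acc) q qs hq]
        simp
      · simp only [pvSplitU, if_neg hc, hq] at hs
        injection hs with h1 h2; subst h1; subst h2
        have hpre : List.isPrefixOf ['_'] (c :: r) = false := by
          simp only [List.isPrefixOf]
          simp only [Bool.and_eq_false_iff]
          exact Or.inl (beq_eq_false_iff_ne.mpr fun h => hc h.symm)
        simp only [PySem.Chars.splitOn.go, hpre]
        rw [ih f hf (c :: cur) acc q qs hq]
        simp

lemma pvSplitOn_eq (l : List Char) : PySem.Chars.splitOn l ['_'] = pvSplitU l := by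
  obtain ⟨p, ps, hp⟩ := pvSplitU_cons l
  rw [PySem.Chars.splitOn, pvGo_eq l (l.length + 1) (by omega) [] [] p ps hp, hp]
  simp

lemma pvDigit_upper {c : Char} (h : PySem.Chars.isdigit c = true) :
    PySem.Chars.upperChar c = c := by
  simp only [PySem.Chars.isdigit, Bool.and_eq_true, decide_eq_true_eq] at h
  rw [PySem.Chars.upperChar, if_neg]
  simp only [PySem.Chars.islower, Bool.and_eq_true, decide_eq_true_eq, not_and]
  intro h3
  exact absurd (le_trans h3 h.2) (by decide)

lemma pvDigit_lower {c : Char} (h : PySem.Chars.isdigit c = true) :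
    PySem.Chars.lowerChar c = c := by
  simp only [PySem.Chars.isdigit, Bool.and_eq_true, decide_eq_true_eq] at h
  rw [PySem.Chars.lowerChar, if_neg]
  simp only [PySem.Chars.isupper, Bool.and_eq_true, decide_eq_true_eq, not_and]
  intro h3
  exact absurd (le_trans h3 h.2) (by decide)

lemma pvAPart_nil : pvAPart [] = [] := by simp [pvAPart]

lemma pvAPart_cons (c : Char) (t : List Char) :
    pvAPart (c :: t) = PySem.Chars.upperChar c :: t.map PySem.Chars.lowerChar := by
  simp only [pvAPart, reduceCtorEq, if_false]
  by_cases hd : PySem.Chars.strIsdigit (c :: t) = true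
  · rw [if_pos hd]
    simp only [PySem.Chars.strIsdigit, Bool.and_eq_true, List.all_cons, List.all_eq_true] at hd
    rw [pvDigit_upper hd.2.1]
    congr 1
    exact ((List.map_congr_left fun x hx => pvDigit_lower (hd.2.2 x hx)).trans
      (List.map_id _)).symm
  · rw [if_neg hd]
    cases t with
    | nil => simp [PySem.Chars.len, PySem.Chars.upper]
    | cons d r =>
      have hlen : 1 < PySem.Chars.len (c :: d :: r) := by
        simp [PySem.Chars.len]
      rw [if_pos hlen]
      simp only [PySem.Chars.slice_eq_listSlice]
      rw [PySem.List.slice_to _ (by norm_num : (0:Int) ≤ 1),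
        PySem.List.slice_from _ (by norm_num : (0:Int) ≤ 1)]
      simp [PySem.Chars.upper, PySem.Chars.lower]

lemma pvJoin_cons_head (x : Char) (p : List Char) (ps : List (List Char)) :
    PySem.Chars.join ['_'] ((x :: p) :: ps) = x :: PySem.Chars.join ['_'] (p :: ps) := by
  cases ps with
  | nil => simp [PySem.Chars.join_singleton]
  | cons q qs => simp [PySem.Chars.join_cons_cons]

lemma pvA_eq_scan (l : List Char) :
    (∀ p ps, pvSplitU l = p :: ps →
      PySem.Chars.join ['_'] ((p :: ps).map pvAPart) = pvScan true l ∧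
      PySem.Chars.join ['_'] (p.map PySem.Chars.lowerChar :: ps.map pvAPart) = pvScan false l) := by
  induction l with
  | nil =>
    intro p ps hs
    simp only [pvSplitU] at hs
    injection hs with h1 h2; subst h1; subst h2
    simp [PySem.Chars.join_singleton, pvAPart_nil, pvScan]
  | cons c r ih =>
    intro p ps hs
    obtain ⟨q, qs, hq⟩ := pvSplitU_cons r
    obtain ⟨ih1, ih2⟩ := ih q qs hq
    by_cases hc : c = '_'
    · subst hc
      simp only [pvSplitU, if_pos, hq] at hs
      injection hs with h1 h2; subst h1; subst h2
      constructor
      · simp only [List.map_cons, pvAPart_nil, PySem.Chars.join_cons_cons,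
          List.nil_append, List.singleton_append]
        rw [show pvAPart q :: List.map pvAPart qs = List.map pvAPart (q :: qs) from rfl, ih1]
        simp [pvScan]
      · simp only [List.map_nil, List.map_cons, PySem.Chars.join_cons_cons,
          List.nil_append, List.singleton_append]
        rw [show pvAPart q :: List.map pvAPart qs = List.map pvAPart (q :: qs) from rfl, ih1]
        simp [pvScan]
    · simp only [pvSplitU, if_neg hc, hq] at hs
      injection hs with h1 h2; subst h1; subst h2
      constructor
      · simp only [List.map_cons, pvAPart_cons, pvJoin_cons_head]
        rw [ih2]
        simp [pvScan, hc]
      · simp only [List.map_cons, pvJoin_cons_head]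
        rw [ih2]
        simp [pvScan, hc]

lemma pvB_foldl (l : List Char) : ∀ acc b,
    (l.foldl pvBStep (acc, b)).1 = acc ++ pvScan b l := by
  induction l with
  | nil => intro acc b; simp [pvScan]
  | cons c r ih =>
    intro acc b
    by_cases hc : c = '_'
    · subst hc
      simp only [List.foldl_cons, pvBStep, if_pos, ih, pvScan]
      simp
    · simp only [List.foldl_cons, pvBStep, if_neg hc, ih, pvScan]
      simp

-- ===== VERDICT (by name: the statement is the Claim_ definition above) =====
theorem stem_title_case_spec : Claim_equal_stem_title_case := by
  intro stem _
  unfold Spec_stem_title_case stem_title_case stem_title_case_alt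
  obtain ⟨p, ps, hp⟩ := pvSplitU_cons stem.toList
  rw [pvSplitOn_eq, hp, (pvA_eq_scan stem.toList p ps hp).1, pvB_foldl]
  simp
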